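-- pv_equiv track=rewrite | github.com/killeress/PatchCore-AI-Detection | capi_dataset_export.py | parse_datastr_per_prefix
-- ===== SOURCE A (Python) =====
-- from typing import Dict, List, Optional, Tuple
--
-- def parse_datastr_per_prefix(datastr: str) -> Dict[str, str]:
--     """解析 RIC DATASTR，回傳 {prefix: "OK"|"NG"} dict。
--
--     例: "W0F00000,OK;WGF50500,OK;G0F00000,NG;3;"
--         → {"W0F00000": "OK", "WGF50500": "OK", "G0F00000": "NG"}
--
--     末尾純數字 (張數計數) 會被略過。空字串回傳空 dict。
--     """
--     out: Dict[str, str] = {}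
--     if not datastr:
--         return out
--     for part in datastr.strip().rstrip(";").split(";"):
--         part = part.strip()
--         if not part or part.isdigit():
--             continue
--         if "," not in part:
--             continue
--         prefix, result = part.rsplit(",", 1)
--         out[prefix.strip()] = result.strip().upper()
--     return out
-- ===== SOURCE B (Python) =====
-- def parse_datastr_per_prefix(datastr: str) -> dict:
--     """Single left-to-right character scan: keep the chars before the last comma
--     of the current segment in `pre` (None if no comma yet) and the chars after
--     it in `cur`; flush one dict entry per ';'-terminated segment."""
--     out = {}
--     pre = None   # chars of current segment before its last comma, or None
--     cur = []     # chars of current segment after its last comma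
--     for c in datastr + ";":
--         if c == ";":
--             if pre is not None:
--                 out["".join(pre).strip()] = "".join(cur).strip().upper()
--             pre, cur = None, []
--         elif c == ",":
--             pre = cur if pre is None else pre + [","] + cur
--             cur = []
--         else:
--             cur.append(c)
--     return out
-- ===== Notes on version B (the rewrite author's own statement) =====
-- stated objective: alternative
-- what changed: Replaces A's strip/rstrip/split/rsplit pipeline with a single left-to-right character scan that maintains the characters before and after the current segment's last comma and flushes one dict entry per semicolon-terminated segment.
import Mathlib
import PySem

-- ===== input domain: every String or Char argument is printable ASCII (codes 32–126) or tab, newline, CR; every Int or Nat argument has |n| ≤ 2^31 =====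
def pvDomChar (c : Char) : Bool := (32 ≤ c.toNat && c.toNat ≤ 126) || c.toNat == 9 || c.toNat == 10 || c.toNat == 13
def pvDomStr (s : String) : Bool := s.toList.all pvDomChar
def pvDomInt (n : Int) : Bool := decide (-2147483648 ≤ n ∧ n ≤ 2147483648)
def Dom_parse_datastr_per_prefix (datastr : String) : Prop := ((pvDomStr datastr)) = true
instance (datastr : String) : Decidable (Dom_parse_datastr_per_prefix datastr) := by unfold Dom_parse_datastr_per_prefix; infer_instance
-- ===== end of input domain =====

-- B replaces A's strip/rstrip/split/rsplit pipeline by one character scan over the string (alternative decomposition, same cost); return-value equivalence, no mutation involved.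

-- ===== PORT A =====
-- part.rsplit(",", 1) when "," in part: split at the LAST comma (exact helper for that builtin call)
def pvRsplit1 : List Char → Option (List Char × List Char)
  | [] => none
  | c :: cs =>
    match pvRsplit1 cs with
    | some (p, q) => some (c :: p, q)
    | none => if c = ',' then some ([], cs) else none

-- s.rstrip(";"): drop trailing ';' characters (exact for the single strip character ';')
def pvRstripSemi (cs : List Char) : List Char := ((cs.reverse).dropWhile (fun c => c = ';')).reverse

def pvAstep (out : PySem.Dict String String) (seg : List Char) : PySem.Dict String String :=
  let part := PySem.Chars.strip seg
  if part.isEmpty || PySem.Chars.strIsdigit part then out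
  else if !(PySem.Chars.isIn [','] part) then out
  else
    match pvRsplit1 part with
    | some (p, q) =>
        out.insert (String.ofList (PySem.Chars.strip p)) (String.ofList (PySem.Chars.upper (PySem.Chars.strip q)))
    | none => out

def parse_datastr_per_prefix (datastr : String) : List (String × String) :=
  if datastr.isEmpty then []
  else
    ((PySem.Chars.splitOn (pvRstripSemi (PySem.Chars.strip datastr.toList)) [';']).foldl
      pvAstep PySem.Dict.empty).items

-- ===== PORT B =====
def pvBflush (out : PySem.Dict String String) (pre : Option (List Char)) (cur : List Char) :
    PySem.Dict String String :=
  match pre with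
  | none => out
  | some p => out.insert (String.ofList (PySem.Chars.strip p)) (String.ofList (PySem.Chars.upper (PySem.Chars.strip cur)))

def pvBloop : List Char → PySem.Dict String String → Option (List Char) → List Char →
    PySem.Dict String String
  | [], out, _, _ => out
  | c :: rest, out, pre, cur =>
    if c = ';' then pvBloop rest (pvBflush out pre cur) none []
    else if c = ',' then
      pvBloop rest out (some (match pre with | none => cur | some p => p ++ ',' :: cur)) []
    else pvBloop rest out pre (cur ++ [c])

def parse_datastr_per_prefix_alt (datastr : String) : List (String × String) :=
  (pvBloop (datastr.toList ++ [';']) PySem.Dict.empty none []).items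

-- ===== PRECONDITION & SPEC =====
def Spec_parse_datastr_per_prefix (datastr : String) (out : List (String × String)) : Prop := out = parse_datastr_per_prefix_alt datastr
instance (datastr : String) (out : List (String × String)) : Decidable (Spec_parse_datastr_per_prefix datastr out) := by unfold Spec_parse_datastr_per_prefix; infer_instance

-- ===== CLAIM (what is proved, stated in full; the proofs are below) =====
def Claim_equal_parse_datastr_per_prefix : Prop := ∀ (datastr : String), Dom_parse_datastr_per_prefix datastr → Spec_parse_datastr_per_prefix datastr (parse_datastr_per_prefix datastr)

-- ===== LEMMAS AND PROOFS =====

-- the one per-segment action both ports amount to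
def pvKB (out : PySem.Dict String String) (seg : List Char) : PySem.Dict String String :=
  match pvRsplit1 seg with
  | some (p, q) =>
      out.insert (String.ofList (PySem.Chars.strip p)) (String.ofList (PySem.Chars.upper (PySem.Chars.strip q)))
  | none => out

-- segments of a char list split on ';'
def pvSegs : List Char → List (List Char)
  | [] => [[]]
  | c :: cs => if c = ';' then [] :: pvSegs cs else (pvSegs cs).modifyHead (c :: ·)

-- modify the last element (identity on [])
def pvMLast (f : List Char → List Char) : List (List Char) → List (List Char)
  | [] => []
  | [a] => [f a]
  | a :: b :: l => a :: pvMLast f (b :: l)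

-- the partial segment encoded by B's state
def pvRep : Option (List Char) → List Char → List Char
  | none, cur => cur
  | some p, cur => p ++ ',' :: cur

theorem pvRsplit1_none_iff (l : List Char) : pvRsplit1 l = none ↔ ',' ∉ l := by
  induction l with
  | nil => simp [pvRsplit1]
  | cons c cs ih =>
    simp only [pvRsplit1]
    cases h : pvRsplit1 cs with
    | some pq =>
      have hm : ',' ∈ cs := by
        by_contra hn
        rw [← ih] at hn
        exact absurd h (by simp [hn])
      simp [List.mem_cons, hm]
    | none =>
      have hn : ',' ∉ cs := ih.mp h
      by_cases hc : c = ','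
      · simp [hc]
      · simp [hc, List.mem_cons, hn, Ne.symm hc]

theorem pvRsplit1_append (p q : List Char) (hq : ',' ∉ q) :
    pvRsplit1 (p ++ ',' :: q) = some (p, q) := by
  induction p with
  | nil => simp [pvRsplit1, (pvRsplit1_none_iff q).mpr hq]
  | cons c p ih => simp [pvRsplit1, ih]

theorem pvRsplit1_some (l p q : List Char) (h : pvRsplit1 l = some (p, q)) :
    l = p ++ ',' :: q ∧ ',' ∉ q := by
  induction l generalizing p q with
  | nil => simp [pvRsplit1] at h
  | cons c cs ih =>
    simp only [pvRsplit1] at h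
    cases h' : pvRsplit1 cs with
    | some pq =>
      rw [h'] at h
      obtain ⟨p', q'⟩ := pq
      simp only [Option.some.injEq, Prod.mk.injEq] at h
      obtain ⟨hp, hqe⟩ := h
      obtain ⟨hl, hnq⟩ := ih p' q' h'
      subst hp; subst hqe; subst hl
      exact ⟨rfl, hnq⟩
    | none =>
      rw [h'] at h
      split_ifs at h with hc
      · simp only [Option.some.injEq, Prod.mk.injEq] at h
        obtain ⟨hp, hqe⟩ := h
        subst hp; subst hqe; subst hc
        exact ⟨rfl, (pvRsplit1_none_iff cs).mp h'⟩

theorem pvRsplit1_snoc (l : List Char) (c : Char) (hc : c ≠ ',') :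
    pvRsplit1 (l ++ [c]) = (pvRsplit1 l).map (fun pq => (pq.1, pq.2 ++ [c])) := by
  induction l with
  | nil => simp [pvRsplit1, hc]
  | cons a l ih =>
    simp only [List.cons_append, pvRsplit1, ih]
    cases h : pvRsplit1 l with
    | some pq => simp
    | none => split_ifs <;> simp

theorem pvDropWhile_idem (p : Char → Bool) (l : List Char) :
    List.dropWhile p (List.dropWhile p l) = List.dropWhile p l := by
  induction l with
  | nil => simp
  | cons c l ih =>
    by_cases h : p c
    · simp [List.dropWhile_cons, h, ih]
    · simp [List.dropWhile_cons, h]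

theorem pvSpaceComma : PySem.Chars.isspace ',' = false := by decide

theorem pvLstrip_append_comma (p q : List Char) :
    PySem.Chars.lstrip (p ++ ',' :: q) = PySem.Chars.lstrip p ++ ',' :: q := by
  simp only [PySem.Chars.lstrip, List.dropWhile_append]
  split_ifs with h
  · rw [List.isEmpty_iff] at h
    rw [h]
    simp [List.dropWhile_cons, pvSpaceComma]
  · rfl

theorem pvRstrip_snoc (l : List Char) (c : Char) :
    PySem.Chars.rstrip (l ++ [c]) =
      if PySem.Chars.isspace c then PySem.Chars.rstrip l else l ++ [c] := by
  simp only [PySem.Chars.rstrip, List.reverse_append, List.reverse_cons, List.reverse_nil,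
    List.nil_append, List.cons_append, List.dropWhile_cons]
  split_ifs with h
  · rfl
  · simp

theorem pvMem_lstrip {c : Char} {l : List Char} (h : c ∈ PySem.Chars.lstrip l) : c ∈ l :=
  (List.dropWhile_sublist _).mem h

theorem pvMem_rstrip {c : Char} {l : List Char} (h : c ∈ PySem.Chars.rstrip l) : c ∈ l := by
  simp only [PySem.Chars.rstrip, List.mem_reverse] at h
  exact List.mem_reverse.mp ((List.dropWhile_sublist _).mem h)

theorem pvRstrip_append_comma (p q : List Char) :
    PySem.Chars.rstrip (p ++ ',' :: q) = p ++ ',' :: PySem.Chars.rstrip q := by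
  simp only [PySem.Chars.rstrip]
  have h1 : (p ++ ',' :: q).reverse = q.reverse ++ (',' :: p.reverse) := by simp
  rw [h1, List.dropWhile_append]
  by_cases h : (List.dropWhile PySem.Chars.isspace q.reverse).isEmpty
  · rw [if_pos h]
    rw [List.isEmpty_iff] at h
    rw [h]
    simp [List.dropWhile_cons, pvSpaceComma]
  · rw [if_neg h]
    simp

theorem pvLstrip_idem (l : List Char) :
    PySem.Chars.lstrip (PySem.Chars.lstrip l) = PySem.Chars.lstrip l := by
  simp only [PySem.Chars.lstrip, pvDropWhile_idem]

theorem pvRstrip_idem (l : List Char) :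
    PySem.Chars.rstrip (PySem.Chars.rstrip l) = PySem.Chars.rstrip l := by
  simp only [PySem.Chars.rstrip, List.reverse_reverse, pvDropWhile_idem]

theorem pvRstrip_cons (c : Char) (l : List Char) :
    PySem.Chars.rstrip (c :: l) =
      if PySem.Chars.rstrip l = [] then (if PySem.Chars.isspace c then [] else [c])
      else c :: PySem.Chars.rstrip l := by
  simp only [PySem.Chars.rstrip, List.reverse_cons, List.dropWhile_append, List.dropWhile_cons,
    List.dropWhile_nil]
  by_cases h : List.dropWhile PySem.Chars.isspace l.reverse = []
  · simp [h]
    split_ifs <;> simp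
  · have h2 : (List.dropWhile PySem.Chars.isspace l.reverse).reverse ≠ [] := by
      simpa using h
    simp [h, h2, List.isEmpty_iff]

theorem pvLR_comm (l : List Char) :
    PySem.Chars.lstrip (PySem.Chars.rstrip l) = PySem.Chars.rstrip (PySem.Chars.lstrip l) := by
  induction l with
  | nil => simp [PySem.Chars.lstrip, PySem.Chars.rstrip]
  | cons c l ih =>
    by_cases hc : PySem.Chars.isspace c
    · have h1 : PySem.Chars.lstrip (c :: l) = PySem.Chars.lstrip l := by
        simp [PySem.Chars.lstrip, List.dropWhile_cons, hc]
      by_cases h0 : PySem.Chars.rstrip l = []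
      · rw [pvRstrip_cons, if_pos h0, if_pos hc, h1, ← ih, h0]
      · rw [pvRstrip_cons, if_neg h0, h1, ← ih]
        have h2 : PySem.Chars.lstrip (c :: PySem.Chars.rstrip l) =
            PySem.Chars.lstrip (PySem.Chars.rstrip l) := by
          simp [PySem.Chars.lstrip, List.dropWhile_cons, hc]
        rw [h2]
    · have h1 : PySem.Chars.lstrip (c :: l) = c :: l := by
        simp [PySem.Chars.lstrip, List.dropWhile_cons, hc]
      rw [h1, pvRstrip_cons]
      by_cases h0 : PySem.Chars.rstrip l = [] <;>
        simp [h0, hc, PySem.Chars.lstrip, List.dropWhile_cons]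

theorem pvStrip_lstrip (l : List Char) :
    PySem.Chars.strip (PySem.Chars.lstrip l) = PySem.Chars.strip l := by
  simp [PySem.Chars.strip, pvLstrip_idem]

theorem pvStrip_rstrip (l : List Char) :
    PySem.Chars.strip (PySem.Chars.rstrip l) = PySem.Chars.strip l := by
  simp only [PySem.Chars.strip, pvLR_comm, pvRstrip_idem]

theorem pvStrip_snoc_space (l : List Char) (c : Char) (hc : PySem.Chars.isspace c) :
    PySem.Chars.strip (l ++ [c]) = PySem.Chars.strip l := by
  simp only [PySem.Chars.strip, PySem.Chars.lstrip, List.dropWhile_append]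
  split_ifs with h
  · simp [List.dropWhile_cons, hc, List.isEmpty_iff.mp h, PySem.Chars.rstrip]
  · rw [show (List.dropWhile PySem.Chars.isspace l ++ [c]) =
        (List.dropWhile PySem.Chars.isspace l ++ [c]) from rfl, pvRstrip_snoc, if_pos hc]

theorem pvKB_nil (out : PySem.Dict String String) : pvKB out [] = out := by
  simp [pvKB, pvRsplit1]

theorem pvKB_lstrip (out : PySem.Dict String String) (seg : List Char) :
    pvKB out (PySem.Chars.lstrip seg) = pvKB out seg := by
  unfold pvKB
  cases h : pvRsplit1 seg with
  | none =>
    have : pvRsplit1 (PySem.Chars.lstrip seg) = none := by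
      rw [pvRsplit1_none_iff] at h ⊢
      intro hm
      exact h (pvMem_lstrip hm)
    rw [this]
  | some pq =>
    obtain ⟨p, q⟩ := pq
    obtain ⟨hl, hq⟩ := pvRsplit1_some seg p q h
    subst hl
    rw [pvLstrip_append_comma, pvRsplit1_append _ _ hq]
    simp [pvStrip_lstrip]

theorem pvKB_rstrip (out : PySem.Dict String String) (seg : List Char) :
    pvKB out (PySem.Chars.rstrip seg) = pvKB out seg := by
  unfold pvKB
  cases h : pvRsplit1 seg with
  | none =>
    have : pvRsplit1 (PySem.Chars.rstrip seg) = none := by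
      rw [pvRsplit1_none_iff] at h ⊢
      intro hm
      exact h (pvMem_rstrip hm)
    rw [this]
  | some pq =>
    obtain ⟨p, q⟩ := pq
    obtain ⟨hl, hq⟩ := pvRsplit1_some seg p q h
    subst hl
    have hq' : ',' ∉ PySem.Chars.rstrip q := by
      intro hm
      exact hq (pvMem_rstrip hm)
    rw [pvRstrip_append_comma, pvRsplit1_append _ _ hq']
    simp [pvStrip_rstrip]

theorem pvKB_strip (out : PySem.Dict String String) (seg : List Char) :
    pvKB out (PySem.Chars.strip seg) = pvKB out seg := by
  rw [show PySem.Chars.strip seg = PySem.Chars.rstrip (PySem.Chars.lstrip seg) from rfl,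
    pvKB_rstrip, pvKB_lstrip]

theorem pvKB_snoc_space (out : PySem.Dict String String) (seg : List Char) (c : Char)
    (hc : PySem.Chars.isspace c) : pvKB out (seg ++ [c]) = pvKB out seg := by
  have hc' : c ≠ ',' := by
    intro h; rw [h] at hc; exact absurd hc (by simp [pvSpaceComma])
  unfold pvKB
  rw [pvRsplit1_snoc seg c hc']
  cases h : pvRsplit1 seg with
  | none => rfl
  | some pq => simp [pvStrip_snoc_space _ _ hc]

theorem pvAstep_eq_KB (out : PySem.Dict String String) (seg : List Char) :
    pvAstep out seg = pvKB out seg := by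
  rw [← pvKB_strip]
  simp only [pvAstep, pvKB]
  cases h : pvRsplit1 (PySem.Chars.strip seg) with
  | none => split_ifs <;> simp [h]
  | some pq =>
    obtain ⟨p, q⟩ := pq
    obtain ⟨hl, hq⟩ := pvRsplit1_some _ p q h
    have hm : ',' ∈ PySem.Chars.strip seg := by rw [hl]; simp
    have h1 : (PySem.Chars.strip seg).isEmpty = false := by
      cases hs : PySem.Chars.strip seg with
      | nil => rw [hs] at hm; simp at hm
      | cons a l => simp
    have h2 : PySem.Chars.strIsdigit (PySem.Chars.strip seg) = false := by
      unfold PySem.Chars.strIsdigit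
      by_contra hd
      simp only [Bool.not_eq_false, Bool.and_eq_true, List.all_eq_true] at hd
      have := hd.2 ',' hm
      exact absurd this (by decide)
    have h3 : PySem.Chars.isIn [','] (PySem.Chars.strip seg) = true := by
      rw [PySem.Chars.isIn_iff_infix]
      rw [hl]
      exact ⟨p, q, by simp⟩
    simp [h1, h2, h3, h]

theorem pvSegs_ne_nil (l : List Char) : pvSegs l ≠ [] := by
  induction l with
  | nil => simp [pvSegs]
  | cons c cs ih =>
    simp only [pvSegs]
    split_ifs
    · simp
    · cases h : pvSegs cs with
      | nil => exact absurd h ih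
      | cons a t => simp

theorem pvSegs_snoc_semi (l : List Char) : pvSegs (l ++ [';']) = pvSegs l ++ [[]] := by
  induction l with
  | nil => simp [pvSegs]
  | cons c cs ih =>
    by_cases hc : c = ';'
    · simp [pvSegs, hc, ih]
    · simp only [List.cons_append, pvSegs, hc, if_neg, ih]
      cases h : pvSegs cs with
      | nil => exact absurd h (pvSegs_ne_nil cs)
      | cons a t => simp

theorem pvSegs_snoc (l : List Char) (c : Char) (hc : c ≠ ';') :
    pvSegs (l ++ [c]) = pvMLast (· ++ [c]) (pvSegs l) := by
  induction l with
  | nil => simp [pvSegs, hc, pvMLast]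
  | cons a cs ih =>
    by_cases ha : a = ';'
    · simp only [List.cons_append, pvSegs, ha, if_pos, ih]
      cases h : pvSegs cs with
      | nil => exact absurd h (pvSegs_ne_nil cs)
      | cons s ss => simp [pvMLast]
    · simp only [List.cons_append, pvSegs, ha, if_neg, ih]
      cases h : pvSegs cs with
      | nil => exact absurd h (pvSegs_ne_nil cs)
      | cons s ss =>
        cases ss with
        | nil => simp [pvMLast]
        | cons s2 ss2 => simp [pvMLast]

theorem pvSegs_lstrip (l : List Char) :
    pvSegs (PySem.Chars.lstrip l) = (pvSegs l).modifyHead PySem.Chars.lstrip := by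
  induction l with
  | nil => simp [pvSegs, PySem.Chars.lstrip]
  | cons c cs ih =>
    by_cases hc : PySem.Chars.isspace c
    · have hcs : c ≠ ';' := by
        intro h; rw [h] at hc; exact absurd hc (by decide)
      rw [show PySem.Chars.lstrip (c :: cs) = PySem.Chars.lstrip cs by
        simp [PySem.Chars.lstrip, List.dropWhile_cons, hc]]
      rw [ih]
      simp only [pvSegs, hcs, if_neg]
      cases h : pvSegs cs with
      | nil => exact absurd h (pvSegs_ne_nil cs)
      | cons s ss =>
        simp [List.modifyHead_cons, PySem.Chars.lstrip, List.dropWhile_cons, hc]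
    · rw [show PySem.Chars.lstrip (c :: cs) = c :: cs by
        simp [PySem.Chars.lstrip, List.dropWhile_cons, hc]]
      by_cases hcs : c = ';'
      · subst hcs
        simp [pvSegs, PySem.Chars.lstrip]
      · simp only [pvSegs, hcs, if_neg]
        cases h : pvSegs cs with
        | nil => exact absurd h (pvSegs_ne_nil cs)
        | cons s ss =>
          simp [List.modifyHead_cons, PySem.Chars.lstrip, List.dropWhile_cons, hc]

theorem pvGo_eq (fuel : Nat) : ∀ (l cur : List Char) (acc : List (List Char)),
    l.length < fuel →
    PySem.Chars.splitOn.go [';'] fuel l cur acc =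
      acc.reverse ++ (pvSegs l).modifyHead (cur.reverse ++ ·) := by
  induction fuel with
  | zero => intro l cur acc h; omega
  | succ fuel ih =>
    intro l cur acc h
    cases l with
    | nil =>
      simp [PySem.Chars.splitOn.go, pvSegs]
    | cons c rest =>
      rw [PySem.Chars.splitOn.go]
      by_cases hc : c = ';'
      · subst hc
        rw [if_pos (by simp [List.isPrefixOf])]
        simp only [List.length_cons, List.length_nil, List.length_singleton,
          List.drop_succ_cons, List.drop_zero]
        rw [ih rest [] (cur.reverse :: acc) (by simp only [List.length_cons] at h; omega)]
        simp only [pvSegs, if_pos rfl, List.modifyHead_cons]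
        cases hs : pvSegs rest with
        | nil => exact absurd hs (pvSegs_ne_nil rest)
        | cons s ss => simp
      · rw [if_neg (by simp [List.isPrefixOf, Ne.symm hc])]
        rw [ih rest (c :: cur) acc (by simp at h; omega)]
        simp only [pvSegs, hc, if_neg]
        cases hs : pvSegs rest with
        | nil => exact absurd hs (pvSegs_ne_nil rest)
        | cons s ss => simp

theorem pvSplitOn_segs (l : List Char) : PySem.Chars.splitOn l [';'] = pvSegs l := by
  rw [PySem.Chars.splitOn, pvGo_eq (l.length + 1) l [] [] (by omega)]
  cases h : pvSegs l with
  | nil => exact absurd h (pvSegs_ne_nil l)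
  | cons s ss => simp

theorem pvFoldA_eq_foldKB (ls : List (List Char)) (d : PySem.Dict String String) :
    ls.foldl pvAstep d = ls.foldl pvKB d := by
  induction ls generalizing d with
  | nil => rfl
  | cons s ss ih => simp [List.foldl_cons, pvAstep_eq_KB, ih]

theorem pvFold_mLast (g : List Char → List Char)
    (hg : ∀ o s, pvKB o (g s) = pvKB o s) (ls : List (List Char)) (d : PySem.Dict String String) :
    (pvMLast g ls).foldl pvKB d = ls.foldl pvKB d := by
  induction ls generalizing d with
  | nil => rfl
  | cons s ss ih =>
    cases ss with
    | nil => simp [pvMLast, hg]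
    | cons s2 ss2 => simp only [pvMLast, List.foldl_cons]; exact ih _

theorem pvFold_lstrip (l : List Char) (d : PySem.Dict String String) :
    (pvSegs (PySem.Chars.lstrip l)).foldl pvKB d = (pvSegs l).foldl pvKB d := by
  rw [pvSegs_lstrip]
  cases h : pvSegs l with
  | nil => exact absurd h (pvSegs_ne_nil l)
  | cons s ss => simp [List.modifyHead_cons, List.foldl_cons, pvKB_lstrip]

theorem pvRstripSemi_snoc (l : List Char) (c : Char) :
    pvRstripSemi (l ++ [c]) = if c = ';' then pvRstripSemi l else l ++ [c] := by
  by_cases hc : c = ';' <;>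
    simp [pvRstripSemi, List.dropWhile_cons, hc]

theorem pvFold_rstripSemi (l : List Char) (d : PySem.Dict String String) :
    (pvSegs (pvRstripSemi l)).foldl pvKB d = (pvSegs l).foldl pvKB d := by
  induction l using List.reverseRecOn with
  | nil => rfl
  | append_singleton l c ih =>
    rw [pvRstripSemi_snoc]
    by_cases hc : c = ';'
    · subst hc
      rw [if_pos rfl, ih, pvSegs_snoc_semi, List.foldl_append]
      simp [pvKB_nil]
    · rw [if_neg hc]

theorem pvFold_snoc_space (l : List Char) (c : Char) (hc : PySem.Chars.isspace c)
    (d : PySem.Dict String String) :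
    (pvSegs (l ++ [c])).foldl pvKB d = (pvSegs l).foldl pvKB d := by
  have hcs : c ≠ ';' := by intro h; rw [h] at hc; exact absurd hc (by decide)
  rw [pvSegs_snoc l c hcs]
  exact pvFold_mLast _ (fun o s => pvKB_snoc_space o s c hc) _ _

theorem pvFold_rstrip (l : List Char) (d : PySem.Dict String String) :
    (pvSegs (pvRstripSemi (PySem.Chars.rstrip l))).foldl pvKB d = (pvSegs l).foldl pvKB d := by
  induction l using List.reverseRecOn with
  | nil => rfl
  | append_singleton l c ih =>
    rw [pvRstrip_snoc]
    by_cases hc : PySem.Chars.isspace c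
    · rw [if_pos hc, ih, ← pvFold_snoc_space l c hc d]
    · rw [if_neg hc, pvFold_rstripSemi]

theorem pvBflush_eq_KB (out : PySem.Dict String String) (pre : Option (List Char)) (cur : List Char)
    (hcur : ',' ∉ cur) : pvBflush out pre cur = pvKB out (pvRep pre cur) := by
  cases pre with
  | none => simp [pvBflush, pvRep, pvKB, (pvRsplit1_none_iff cur).mpr hcur]
  | some p => simp [pvBflush, pvRep, pvKB, pvRsplit1_append p cur hcur]

theorem pvBloop_eq_fold (cs : List Char) : ∀ (out : PySem.Dict String String)
    (pre : Option (List Char)) (cur : List Char), ',' ∉ cur →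
    pvBloop (cs ++ [';']) out pre cur =
      ((pvSegs cs).modifyHead (pvRep pre cur ++ ·)).foldl pvKB out := by
  induction cs with
  | nil =>
    intro out pre cur hcur
    simp only [List.nil_append, pvBloop, if_pos rfl, pvSegs, List.modifyHead_cons,
      List.foldl_cons, List.foldl_nil, List.append_nil]
    rw [pvBflush_eq_KB out pre cur hcur]
    simp
  | cons c cs ih =>
    intro out pre cur hcur
    by_cases hc : c = ';'
    · subst hc
      rw [List.cons_append, pvBloop.eq_def]
      simp only [if_pos rfl]
      rw [ih (pvBflush out pre cur) none [] (by simp)]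
      simp only [pvSegs, if_pos rfl, List.modifyHead_cons, List.foldl_cons]
      rw [pvBflush_eq_KB out pre cur hcur]
      simp only [pvRep, List.nil_append, List.append_nil]
      cases hs : pvSegs cs with
      | nil => exact absurd hs (pvSegs_ne_nil cs)
      | cons s ss => simp
    · by_cases hcm : c = ','
      · subst hcm
        rw [List.cons_append, pvBloop.eq_def]
        simp only [if_neg (by decide : (',' : Char) ≠ ';'), if_pos rfl]
        rw [ih out (some (match pre with | none => cur | some p => p ++ ',' :: cur)) []
          (by simp)]
        simp only [pvSegs, if_neg (by decide : (',' : Char) ≠ ';')]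
        have hrep : pvRep (some (match pre with | none => cur | some p => p ++ ',' :: cur)) [] =
            pvRep pre cur ++ [','] := by
          cases pre <;> simp [pvRep]
        rw [hrep]
        cases hs : pvSegs cs with
        | nil => exact absurd hs (pvSegs_ne_nil cs)
        | cons s ss => simp
      · rw [List.cons_append, pvBloop.eq_def]
        simp only [if_neg hc, if_neg hcm]
        rw [ih out pre (cur ++ [c]) (by
          intro hm
          rcases List.mem_append.mp hm with h | h
          · exact hcur h
          · simp at h; exact hcm h.symm)]
        simp only [pvSegs, hc, if_neg]
        have hrep : pvRep pre (cur ++ [c]) = pvRep pre cur ++ [c] := by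
          cases pre <;> simp [pvRep]
        rw [hrep]
        cases hs : pvSegs cs with
        | nil => exact absurd hs (pvSegs_ne_nil cs)
        | cons s ss => simp

theorem pvAlt_eq (datastr : String) :
    parse_datastr_per_prefix_alt datastr =
      ((pvSegs datastr.toList).foldl pvKB PySem.Dict.empty).items := by
  unfold parse_datastr_per_prefix_alt
  rw [pvBloop_eq_fold datastr.toList PySem.Dict.empty none [] (by simp)]
  cases hs : pvSegs datastr.toList with
  | nil => exact absurd hs (pvSegs_ne_nil _)
  | cons s ss => simp [pvRep]

-- ===== VERDICT (by name: the statement is the Claim_ definition above) =====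
theorem parse_datastr_per_prefix_spec : Claim_equal_parse_datastr_per_prefix := by
  intro datastr _
  unfold Spec_parse_datastr_per_prefix
  rw [pvAlt_eq]
  unfold parse_datastr_per_prefix
  by_cases h : datastr.isEmpty
  · rw [if_pos h]
    have he : datastr = "" := String.isEmpty_iff.mp h
    subst he
    simp [pvSegs, pvKB_nil]
    rfl
  · rw [if_neg h]
    rw [pvSplitOn_segs, pvFoldA_eq_foldKB]
    rw [show PySem.Chars.strip datastr.toList =
      PySem.Chars.rstrip (PySem.Chars.lstrip datastr.toList) from rfl]
    rw [pvFold_rstrip, pvFold_lstrip]
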